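-- pv_equiv track=rewrite | github.com/lakhan72002/Longest-Compound-Word | compound.py | two_largest_word
-- ===== SOURCE A (Python) =====
-- def two_largest_word(words):
--     if not words:
--         return None, None  # Handle the case of an empty list
--
--     longest_word = ""
--     second_longest_word = ""
--
--     for w in words:
--         if len(w) > len(longest_word):
--             second_longest_word = longest_word
--             longest_word = w
--         elif len(w) > len(second_longest_word) and w != longest_word:
--             second_longest_word = w
--
--     return longest_word, second_longest_word
--
-- words = []
-- ===== SOURCE B (Python) =====
-- def two_largest_word(words):
--     if not words:
--         return None, None
--     longest = max(words, key=len)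
--     rest = [w for w in words if w != longest]
--     second = max(rest, key=len) if rest else ""
--     return longest, second
-- ===== Notes on version B (the rewrite author's own statement) =====
-- stated objective: idiomatic
-- what changed: A's single scan carrying two accumulators with an interleaved branch chain is replaced by the idiomatic decomposition: longest = max(words, key=len), then second = max over the words value-distinct from longest (defaulting to ""), relying on max's first-extremal rule.
import Mathlib
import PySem

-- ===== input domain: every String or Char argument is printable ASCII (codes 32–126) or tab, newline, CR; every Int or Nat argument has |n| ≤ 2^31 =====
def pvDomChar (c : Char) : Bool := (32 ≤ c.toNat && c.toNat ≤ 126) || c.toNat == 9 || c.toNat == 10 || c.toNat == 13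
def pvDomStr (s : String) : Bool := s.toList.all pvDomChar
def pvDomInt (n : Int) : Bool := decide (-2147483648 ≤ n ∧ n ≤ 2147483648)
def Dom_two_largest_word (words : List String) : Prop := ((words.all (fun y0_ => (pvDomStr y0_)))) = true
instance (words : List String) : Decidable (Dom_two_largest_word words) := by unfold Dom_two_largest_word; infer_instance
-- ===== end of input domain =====

-- B replaces A's single two-accumulator scan by the idiomatic decomposition: longest = max(words, key=len),
-- second = max of the words value-distinct from longest (or ""); objective: idiomatic, not faster.

-- ===== PORT A =====
-- literal port of A: one fold carrying (longest_word, second_longest_word), branches in Python's order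
def two_largest_word (words : List String) : Option String × Option String :=
  if words = [] then (none, none)
  else
    let st := words.foldl
      (fun (p : String × String) w =>
        if PySem.Str.len w > PySem.Str.len p.1 then (w, p.1)
        else if PySem.Str.len w > PySem.Str.len p.2 ∧ w ≠ p.1 then (p.1, w)
        else p)
      ("", "")
    (some st.1, some st.2)

-- ===== PORT B =====
-- port of Source B: max by len, filter out the longest's value, max again (defaulting "")
def two_largest_word_alt (words : List String) : Option String × Option String :=
  if words = [] then (none, none)
  else
    match PySem.List.max? words PySem.Str.len with
    | none => (none, none)   -- unreachable: words ≠ []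
    | some longest =>
      let rest := words.filter (fun w => w != longest)
      let second := match PySem.List.max? rest PySem.Str.len with
        | some m => m
        | none => ""
      (some longest, some second)

-- ===== PRECONDITION & SPEC =====
def Spec_two_largest_word (words : List String) (out : Option String × Option String) : Prop := out = two_largest_word_alt words
instance (words : List String) (out : Option String × Option String) : Decidable (Spec_two_largest_word words out) := by unfold Spec_two_largest_word; infer_instance

-- ===== CLAIM (what is proved, stated in full; the proofs are below) =====
def Claim_equal_two_largest_word : Prop := ∀ (words : List String), Dom_two_largest_word words → Spec_two_largest_word words (two_largest_word words)

-- ===== LEMMAS AND PROOFS =====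

-- running first-max-by-length fold (proof helper; the shape shared by A's longest and Python's max(·, key=len))
def pvMfold (a : String) (ws : List String) : String :=
  ws.foldl (fun t v => if PySem.Str.len t < PySem.Str.len v then v else t) a

theorem pvMfold_cons (a w : String) (ws : List String) :
    pvMfold a (w :: ws) = pvMfold (if PySem.Str.len a < PySem.Str.len w then w else a) ws := rfl

theorem pvMfold_mono : ∀ (ws : List String) (a : String),
    PySem.Str.len a ≤ PySem.Str.len (pvMfold a ws) := by
  intro ws
  induction ws with
  | nil => intro a; simp [pvMfold]
  | cons w ws ih =>
    intro a
    rw [pvMfold_cons]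
    by_cases h : PySem.Str.len a < PySem.Str.len w
    · simp only [if_pos h]
      exact le_of_lt (lt_of_lt_of_le h (ih w))
    · simp only [if_neg h]; exact ih a

theorem pvStr_ofList_toList (w : String) (hl : w.toList = []) : w = "" := by
  have := congrArg String.ofList hl; simpa using this

theorem pvLen_empty : PySem.Str.len "" = 0 := by decide

theorem pvLen_pos (w : String) (h : w.toList ≠ []) : PySem.Str.len "" < PySem.Str.len w := by
  have h1 : 0 < w.toList.length := List.length_pos_iff.mpr h
  have h2 : (0:Int) < w.toList.length := by exact_mod_cast h1
  simpa [PySem.Str.len, pvLen_empty] using h2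

theorem pvLen_zero_eq_empty (w : String) (h : ¬ (PySem.Str.len "" < PySem.Str.len w)) : w = "" := by
  by_contra hw
  exact h (pvLen_pos w (fun hl => hw (pvStr_ofList_toList w hl)))

theorem pvMfold_empty_cons (w : String) (ws : List String) :
    pvMfold "" (w :: ws) = pvMfold w ws := by
  rw [pvMfold_cons]
  by_cases h : PySem.Str.len "" < PySem.Str.len w
  · rw [if_pos h]
  · rw [if_neg h, pvLen_zero_eq_empty w h]

-- max?(xs, key=len): the seeded accumulator fold is pvMfold (stated for any function with max?'s step)
theorem pvMaxFold (f : Option String → String → Option String)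
    (hf : ∀ m x, f (some m) x = (if PySem.Str.len m < PySem.Str.len x then some x else some m)) :
    ∀ (ws : List String) (a : String), List.foldl f (some a) ws = some (pvMfold a ws) := by
  intro ws
  induction ws with
  | nil => intro a; rfl
  | cons w ws ih =>
    intro a
    by_cases h : PySem.Str.len a < PySem.Str.len w
    · simp only [List.foldl_cons, hf, pvMfold_cons, if_pos h]; exact ih w
    · simp only [List.foldl_cons, hf, pvMfold_cons, if_neg h]; exact ih a

theorem pvMax_cons (w : String) (ws : List String) :
    PySem.List.max? (w :: ws) PySem.Str.len = some (pvMfold w ws) := by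
  show List.foldl _ (some w) ws = _
  exact pvMaxFold _ (fun m x => rfl) ws w

-- A's fold, named for the proofs (definitionally the fold inside the port)
def pvAfold (ws : List String) (p : String × String) : String × String :=
  ws.foldl
    (fun (p : String × String) w =>
      if PySem.Str.len w > PySem.Str.len p.1 then (w, p.1)
      else if PySem.Str.len w > PySem.Str.len p.2 ∧ w ≠ p.1 then (p.1, w)
      else p)
    p

theorem pvAfold_fst : ∀ (ws : List String) (L S : String),
    (pvAfold ws (L, S)).1 = pvMfold L ws := by
  intro ws
  induction ws with
  | nil => intro L S; rfl
  | cons w ws ih =>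
    intro L S
    simp only [pvAfold, List.foldl_cons, pvMfold_cons]
    by_cases h : PySem.Str.len w > PySem.Str.len L
    · simp only [if_pos h]
      exact ih w L
    · simp only [if_neg h]
      by_cases hc : PySem.Str.len w > PySem.Str.len S ∧ w ≠ L
      · simp only [if_pos hc]; exact ih L w
      · simp only [if_neg hc]; exact ih L S

-- the key invariant: A's second accumulator equals B's max-over-the-value-distinct-words fold
theorem pvAfold_snd : ∀ (ws : List String) (L S T M : String),
    M = pvMfold L ws → (L = M → S = T) → (L ≠ M → T = L) →
    (pvAfold ws (L, S)).2 =
      ws.foldl (fun t v => if v ≠ M then (if PySem.Str.len t < PySem.Str.len v then v else t) else t) T := by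
  intro ws
  induction ws with
  | nil =>
    intro L S T M hM hST _
    simp [pvMfold] at hM
    exact hST hM.symm
  | cons w ws ih =>
    intro L S T M hM hST hT
    rw [pvMfold_cons] at hM
    simp only [pvAfold, List.foldl_cons]
    by_cases h1 : PySem.Str.len w > PySem.Str.len L
    · -- displacement: new state (w, L)
      rw [if_pos h1]
      rw [if_pos (show PySem.Str.len L < PySem.Str.len w from h1)] at hM
      have hwM : PySem.Str.len w ≤ PySem.Str.len M := hM ▸ pvMfold_mono ws w
      have hLM : L ≠ M := by
        intro he
        have : PySem.Str.len L < PySem.Str.len M := lt_of_lt_of_le h1 hwM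
        rw [← he] at this; exact lt_irrefl _ this
      have hTL : T = L := hT hLM
      by_cases hw : w = M
      · rw [if_neg (by simp [hw])]
        exact ih w L T M hM (fun _ => hTL.symm) (fun hne => absurd hw hne)
      · rw [if_pos hw, if_pos (by rw [hTL]; exact h1)]
        exact ih w L w M hM (fun he => absurd he hw) (fun _ => rfl)
    · -- no displacement
      rw [if_neg h1]
      rw [if_neg (show ¬ PySem.Str.len L < PySem.Str.len w from h1)] at hM
      by_cases hLM : L = M
      · have hST' := hST hLM
        by_cases hw : w = M
        · have hwL : w = L := hw.trans hLM.symm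
          rw [if_neg (show ¬ (w ≠ M) from fun hn => hn hw),
              if_neg (show ¬ (PySem.Str.len w > PySem.Str.len S ∧ w ≠ L) from fun hc => hc.2 hwL)]
          exact ih L S T M hM (fun _ => hST') (fun hne => absurd hLM hne)
        · rw [if_pos hw, ← hST']
          by_cases h2 : PySem.Str.len w > PySem.Str.len S
          · rw [if_pos ⟨h2, by rw [hLM]; exact hw⟩,
                if_pos (show PySem.Str.len S < PySem.Str.len w from h2)]
            exact ih L w w M hM (fun _ => rfl) (fun hne => absurd hLM hne)
          · rw [if_neg (by intro hc; exact h2 hc.1),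
                if_neg (show ¬ PySem.Str.len S < PySem.Str.len w from h2)]
            exact ih L S S M hM (fun _ => rfl) (fun hne => absurd hLM hne)
      · have hTL : T = L := hT hLM
        have hBstay : (if w ≠ M then (if PySem.Str.len T < PySem.Str.len w then w else T) else T) = T := by
          by_cases hw : w ≠ M
          · rw [if_pos hw, if_neg (by rw [hTL]; exact h1)]
          · rw [if_neg hw]
        rw [hBstay]
        by_cases hc : PySem.Str.len w > PySem.Str.len S ∧ w ≠ L
        · rw [if_pos hc]
          exact ih L w T M hM (fun he => absurd he hLM) (fun _ => hTL)
        · rw [if_neg hc]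
          exact ih L S T M hM (fun he => absurd he hLM) (fun _ => hTL)

-- pushing the ≠-test of the fold into a filter (B's list comprehension)
theorem pvFold_filter : ∀ (ws : List String) (T M : String),
    ws.foldl (fun t v => if v ≠ M then (if PySem.Str.len t < PySem.Str.len v then v else t) else t) T
      = pvMfold T (ws.filter (fun v => v != M)) := by
  intro ws
  induction ws with
  | nil => intro T M; rfl
  | cons w ws ih =>
    intro T M
    simp only [List.foldl_cons, List.filter_cons]
    by_cases hw : w = M
    · have hb : (w != M) = false := by simp [hw]
      rw [if_neg (show ¬ (w ≠ M) from fun hn => hn hw), hb, if_neg Bool.false_ne_true]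
      exact ih T M
    · have hb : (w != M) = true := by simp [hw]
      rw [if_pos (show w ≠ M from hw), hb, if_pos rfl, pvMfold_cons]
      by_cases h : PySem.Str.len T < PySem.Str.len w
      · rw [if_pos h]; exact ih w M
      · rw [if_neg h]; exact ih T M

theorem pvA_eq (w : String) (ws : List String) :
    two_largest_word (w :: ws)
      = (some (pvMfold "" (w :: ws)), some ((pvAfold (w :: ws) ("", "")).2)) := by
  unfold two_largest_word
  rw [if_neg (show (w :: ws) ≠ ([] : List String) by simp)]
  show (some (pvAfold (w :: ws) ("", "")).1, some (pvAfold (w :: ws) ("", "")).2) = _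
  rw [pvAfold_fst]

theorem pvAlt_eq (w : String) (ws : List String) :
    two_largest_word_alt (w :: ws)
      = (some (pvMfold w ws),
         some (pvMfold "" ((w :: ws).filter (fun v => v != pvMfold w ws)))) := by
  unfold two_largest_word_alt
  rw [if_neg (show (w :: ws) ≠ ([] : List String) by simp), pvMax_cons]
  simp only []
  cases hrest : PySem.List.max? ((w :: ws).filter (fun v => v != pvMfold w ws)) PySem.Str.len with
  | none =>
    have : (w :: ws).filter (fun v => v != pvMfold w ws) = [] :=
      (PySem.List.max?_eq_none_iff _ _).mp hrest
    rw [this]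
    rfl
  | some m =>
    cases hfl : (w :: ws).filter (fun v => v != pvMfold w ws) with
    | nil => rw [hfl] at hrest; exact absurd hrest (by simp [PySem.List.max?])
    | cons x t =>
      rw [hfl] at hrest
      rw [pvMax_cons] at hrest
      have hm : m = pvMfold x t := by
        injection hrest with h; exact h.symm
      have hred : (match some m with | some m => m | none => "") = m := rfl
      rw [hred, hm, pvMfold_empty_cons x t]

-- ===== VERDICT (by name: the statement is the Claim_ definition above) =====
theorem two_largest_word_spec : Claim_equal_two_largest_word := by
  intro words _
  unfold Spec_two_largest_word
  cases words with
  | nil => rfl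
  | cons w ws =>
    rw [pvA_eq, pvAlt_eq, pvMfold_empty_cons]
    have h2 : (pvAfold (w :: ws) ("", "")).2
        = pvMfold "" ((w :: ws).filter (fun v => v != pvMfold w ws)) := by
      rw [pvAfold_snd (w :: ws) "" "" "" (pvMfold w ws) (pvMfold_empty_cons w ws).symm
            (fun _ => rfl) (fun _ => rfl),
          pvFold_filter]
    rw [h2]
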